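-- pv_equiv track=rewrite | github.com/alokyadva26/repoLens-ai | backend/ai_engine.py | generate_rag_answer
-- ===== SOURCE A (Python) =====
-- def generate_rag_answer(question: str, context: str) -> dict:
--     """
--     Synthesise a grounded natural-language answer from retrieved context chunks.
--
--     The answer is composed by matching the question intent against the context
--     text, then constructing a coherent response that cites specific passages.
--     Because we are running without an LLM API call, the synthesis is done via
--     structured template selection — the answer always clearly attributes its
--     content to the retrieved repository information.
--
--     Args:
--         question: The user's plain-English question.
--         context:  The concatenated context string from ``retrieve_context``.
--
--     Returns:
--         A dict ``{"answer": str}`` — always non-empty, never raises.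
--     """
--     question = (question or "").strip()
--     context  = (context  or "").strip()
--
--     if not context:
--         return {"answer": "No relevant repository information was found to answer this question."}
--
--     if not question:
--         return {"answer": f"Based on the repository information:\n\n{context}"}
--
--     q_lower = question.lower()
--
--     try:
--         # ── Template selection based on question intent ───────────────────────
--         INTRO = "Based on the repository information:\n\n"
--
--         # Security questions — lead with the relevant context chunk
--         if any(kw in q_lower for kw in ("security", "vulnerability", "risk", "safe", "credentials")):
--             sec_lines = [ln for ln in context.splitlines() if "security" in ln.lower() or "risk" in ln.lower()]
--             body = "\n".join(sec_lines) if sec_lines else context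
--             return {"answer": f"{INTRO}{body}\n\nReview these risks and address them before deploying to production."}
--
--         # Installation / setup
--         if any(kw in q_lower for kw in ("install", "run", "setup", "start", "deploy", "get started")):
--             install_lines = [ln for ln in context.splitlines() if any(k in ln.lower() for k in ("install", "step", "clone", "run", "→"))]
--             body = "\n".join(install_lines) if install_lines else context
--             return {"answer": f"{INTRO}{body}"}
--
--         # Architecture / structure
--         if any(kw in q_lower for kw in ("architect", "structure", "design", "layer", "pattern")):
--             arch_lines = [ln for ln in context.splitlines() if any(k in ln.lower() for k in ("architect", "layer", "structure", "pattern"))]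
--             body = "\n".join(arch_lines) if arch_lines else context
--             return {"answer": f"{INTRO}{body}"}
--
--         # Tech stack / frameworks
--         if any(kw in q_lower for kw in ("tech", "framework", "language", "stack", "built with", "technology")):
--             tech_lines = [ln for ln in context.splitlines() if any(k in ln.lower() for k in ("tech", "framework", "language", "stack"))]
--             body = "\n".join(tech_lines) if tech_lines else context
--             return {"answer": f"{INTRO}{body}"}
--
--         # Performance
--         if any(kw in q_lower for kw in ("performance", "speed", "optim", "slow", "fast", "memory")):
--             perf_lines = [ln for ln in context.splitlines() if "performance" in ln.lower() or "optim" in ln.lower()]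
--             body = "\n".join(perf_lines) if perf_lines else context
--             return {"answer": f"{INTRO}{body}"}
--
--         # Quality / score
--         if any(kw in q_lower for kw in ("quality", "score", "rating", "grade")):
--             quality_lines = [ln for ln in context.splitlines() if "quality" in ln.lower() or "score" in ln.lower()]
--             body = "\n".join(quality_lines) if quality_lines else context
--             return {"answer": f"{INTRO}{body}"}
--
--         # Default: return all retrieved context with a grounding prefix
--         return {"answer": f"{INTRO}{context}"}
--
--     except Exception:
--         return {"answer": f"Based on the repository information:\n\n{context}"}
-- ===== SOURCE B (Python) =====
-- # Precompute-then-select re-implementation: build the full boolean match vector and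
-- # all six per-category line buckets in one pass over the context, then select by index.
--
-- _INTRO = "Based on the repository information:\n\n"
--
-- _TRIGGERS = [
--     ("security", "vulnerability", "risk", "safe", "credentials"),
--     ("install", "run", "setup", "start", "deploy", "get started"),
--     ("architect", "structure", "design", "layer", "pattern"),
--     ("tech", "framework", "language", "stack", "built with", "technology"),
--     ("performance", "speed", "optim", "slow", "fast", "memory"),
--     ("quality", "score", "rating", "grade"),
-- ]
--
-- _FILTERS = [
--     ("security", "risk"),
--     ("install", "step", "clone", "run", "\u2192"),
--     ("architect", "layer", "structure", "pattern"),
--     ("tech", "framework", "language", "stack"),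
--     ("performance", "optim"),
--     ("quality", "score"),
-- ]
--
-- _SUFFIXES = [
--     "\n\nReview these risks and address them before deploying to production.",
--     "", "", "", "", "",
-- ]
--
--
-- def generate_rag_answer(question: str, context: str) -> dict:
--     question = (question or "").strip()
--     context = (context or "").strip()
--     if not context:
--         return {"answer": "No relevant repository information was found to answer this question."}
--     if not question:
--         return {"answer": _INTRO + context}
--
--     q_lower = question.lower()
--     matches = [any(t in q_lower for t in trigs) for trigs in _TRIGGERS]
--     if True not in matches:
--         return {"answer": _INTRO + context}
--     i = matches.index(True)
--
--     # one pass over the context classifying every line into all category buckets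
--     buckets = [[] for _ in _FILTERS]
--     for ln in context.splitlines():
--         low = ln.lower()
--         buckets = [b + [ln] if any(f in low for f in fs) else b
--                    for b, fs in zip(buckets, _FILTERS)]
--
--     body = "\n".join(buckets[i]) if buckets[i] else context
--     return {"answer": _INTRO + body + _SUFFIXES[i]}
-- ===== Notes on version B (the rewrite author's own statement) =====
-- stated objective: alternative
-- what changed: A's lazy six-branch if-cascade, each branch filtering the context inline before returning, is replaced by a precompute-then-select design: B builds the whole boolean match vector over all categories, picks the category as matches.index(True), and fills all six per-category line buckets in a single pass over the context lines before joining the selected bucket.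
import Mathlib
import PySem

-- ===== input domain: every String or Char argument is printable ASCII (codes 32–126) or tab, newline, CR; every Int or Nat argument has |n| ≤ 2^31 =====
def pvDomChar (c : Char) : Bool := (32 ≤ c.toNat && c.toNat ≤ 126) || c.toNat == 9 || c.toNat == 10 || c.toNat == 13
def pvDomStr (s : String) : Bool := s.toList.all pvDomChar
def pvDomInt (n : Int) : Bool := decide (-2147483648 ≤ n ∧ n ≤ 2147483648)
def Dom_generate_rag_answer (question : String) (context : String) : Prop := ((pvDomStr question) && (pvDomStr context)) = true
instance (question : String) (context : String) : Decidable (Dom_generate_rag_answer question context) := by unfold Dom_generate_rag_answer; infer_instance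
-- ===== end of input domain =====

-- B replaces A's lazy six-branch if-cascade (each branch filtering the context inline before
-- returning) by precompute-then-select: a full boolean match vector, matches.index(True), and
-- all six per-category line buckets filled in one pass over the context; objective: alternative.

-- shared transliteration of the genexp 'any(kw in s for kw in kws)' (both Pythons use it verbatim)
def pvAnyIn (kws : List String) (s : String) : Bool := kws.any (fun kw => PySem.Str.isIn kw s)

-- ===== PORT A =====
def pvIntro : String := "Based on the repository information:\n\n"

-- 'lines = [ln for ln in context.splitlines() if <pred>(ln)]; body = "\n".join(lines) if lines else context'
def pvBody (c : String) (p : String → Bool) : String :=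
  let lines := (PySem.Str.splitlines c).filter p
  if lines ≠ [] then PySem.Str.join "\n" lines else c

def generate_rag_answer (question : String) (context : String) : List (String × String) :=
  let q := PySem.Str.strip question
  let c := PySem.Str.strip context
  if c = "" then
    [("answer", "No relevant repository information was found to answer this question.")]
  else if q = "" then
    [("answer", pvIntro ++ c)]
  else
    let ql := PySem.Str.lower q
    if pvAnyIn ["security", "vulnerability", "risk", "safe", "credentials"] ql then
      [("answer", pvIntro ++ pvBody c (fun ln => PySem.Str.isIn "security" (PySem.Str.lower ln) || PySem.Str.isIn "risk" (PySem.Str.lower ln)) ++ "\n\nReview these risks and address them before deploying to production.")]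
    else if pvAnyIn ["install", "run", "setup", "start", "deploy", "get started"] ql then
      [("answer", pvIntro ++ pvBody c (fun ln => pvAnyIn ["install", "step", "clone", "run", "→"] (PySem.Str.lower ln)))]
    else if pvAnyIn ["architect", "structure", "design", "layer", "pattern"] ql then
      [("answer", pvIntro ++ pvBody c (fun ln => pvAnyIn ["architect", "layer", "structure", "pattern"] (PySem.Str.lower ln)))]
    else if pvAnyIn ["tech", "framework", "language", "stack", "built with", "technology"] ql then
      [("answer", pvIntro ++ pvBody c (fun ln => pvAnyIn ["tech", "framework", "language", "stack"] (PySem.Str.lower ln)))]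
    else if pvAnyIn ["performance", "speed", "optim", "slow", "fast", "memory"] ql then
      [("answer", pvIntro ++ pvBody c (fun ln => PySem.Str.isIn "performance" (PySem.Str.lower ln) || PySem.Str.isIn "optim" (PySem.Str.lower ln)))]
    else if pvAnyIn ["quality", "score", "rating", "grade"] ql then
      [("answer", pvIntro ++ pvBody c (fun ln => PySem.Str.isIn "quality" (PySem.Str.lower ln) || PySem.Str.isIn "score" (PySem.Str.lower ln)))]
    else
      [("answer", pvIntro ++ c)]

-- ===== PORT B =====
def pvTriggers : List (List String) :=
  [["security", "vulnerability", "risk", "safe", "credentials"],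
   ["install", "run", "setup", "start", "deploy", "get started"],
   ["architect", "structure", "design", "layer", "pattern"],
   ["tech", "framework", "language", "stack", "built with", "technology"],
   ["performance", "speed", "optim", "slow", "fast", "memory"],
   ["quality", "score", "rating", "grade"]]

def pvFilters : List (List String) :=
  [["security", "risk"],
   ["install", "step", "clone", "run", "→"],
   ["architect", "layer", "structure", "pattern"],
   ["tech", "framework", "language", "stack"],
   ["performance", "optim"],
   ["quality", "score"]]

def pvSuffixes : List String :=
  ["\n\nReview these risks and address them before deploying to production.", "", "", "", "", ""]

-- body of Source B's for-loop: the bucket comprehension over zip(buckets, _FILTERS)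
def pvStep (bs : List (List String)) (ln : String) : List (List String) :=
  let low := PySem.Str.lower ln
  (bs.zip pvFilters).map (fun p => if pvAnyIn p.2 low then p.1 ++ [ln] else p.1)

def generate_rag_answer_alt (question : String) (context : String) : List (String × String) :=
  let q := PySem.Str.strip question
  let c := PySem.Str.strip context
  if c = "" then
    [("answer", "No relevant repository information was found to answer this question.")]
  else if q = "" then
    [("answer", pvIntro ++ c)]
  else
    let ql := PySem.Str.lower q
    let hits := pvTriggers.map (fun trigs => pvAnyIn trigs ql)
    if !(hits.contains true) then
      [("answer", pvIntro ++ c)]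
    else
      let i := hits.idxOf true          -- matches.index(True); in range since True ∈ matches
      let buckets := (PySem.Str.splitlines c).foldl pvStep (pvFilters.map (fun _ => []))
      let bl := buckets.getD i []          -- buckets[i]; i < 6 always, getD never defaults
      let body := if bl ≠ [] then PySem.Str.join "\n" bl else c
      [("answer", pvIntro ++ body ++ pvSuffixes.getD i "")]

-- ===== PRECONDITION & SPEC =====
def Spec_generate_rag_answer (question : String) (context : String) (out : List (String × String)) : Prop := out = generate_rag_answer_alt question context
instance (question : String) (context : String) (out : List (String × String)) : Decidable (Spec_generate_rag_answer question context out) := by unfold Spec_generate_rag_answer; infer_instance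

-- ===== CLAIM (what is proved, stated in full; the proofs are below) =====
def Claim_equal_generate_rag_answer : Prop := ∀ (question : String) (context : String), Dom_generate_rag_answer question context → Spec_generate_rag_answer question context (generate_rag_answer question context)

-- ===== LEMMAS AND PROOFS =====

-- one bucket-comprehension step on an explicit 6-list of buckets
theorem pvStep_explicit (b0 b1 b2 b3 b4 b5 : List String) (ln : String) :
    pvStep [b0, b1, b2, b3, b4, b5] ln =
      [(if pvAnyIn (pvFilters.getD 0 []) (PySem.Str.lower ln) then b0 ++ [ln] else b0),
       (if pvAnyIn (pvFilters.getD 1 []) (PySem.Str.lower ln) then b1 ++ [ln] else b1),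
       (if pvAnyIn (pvFilters.getD 2 []) (PySem.Str.lower ln) then b2 ++ [ln] else b2),
       (if pvAnyIn (pvFilters.getD 3 []) (PySem.Str.lower ln) then b3 ++ [ln] else b3),
       (if pvAnyIn (pvFilters.getD 4 []) (PySem.Str.lower ln) then b4 ++ [ln] else b4),
       (if pvAnyIn (pvFilters.getD 5 []) (PySem.Str.lower ln) then b5 ++ [ln] else b5)] := by
  simp [pvStep, pvFilters, List.zip, List.map]

-- prepending one ite-step to a filtered tail is filtering the cons
theorem pvConsFilter (b : List String) (p : String → Bool) (ln : String) (rest : List String) :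
    (if p ln then b ++ [ln] else b) ++ rest.filter p = b ++ (ln :: rest).filter p := by
  by_cases h : p ln = true <;> simp [h]

-- the one-pass bucket fold computes the six independent line filters
theorem pvBuckets_eq (lines : List String) : ∀ b0 b1 b2 b3 b4 b5 : List String,
    List.foldl pvStep [b0, b1, b2, b3, b4, b5] lines =
      [b0 ++ lines.filter (fun ln => pvAnyIn (pvFilters.getD 0 []) (PySem.Str.lower ln)),
       b1 ++ lines.filter (fun ln => pvAnyIn (pvFilters.getD 1 []) (PySem.Str.lower ln)),
       b2 ++ lines.filter (fun ln => pvAnyIn (pvFilters.getD 2 []) (PySem.Str.lower ln)),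
       b3 ++ lines.filter (fun ln => pvAnyIn (pvFilters.getD 3 []) (PySem.Str.lower ln)),
       b4 ++ lines.filter (fun ln => pvAnyIn (pvFilters.getD 4 []) (PySem.Str.lower ln)),
       b5 ++ lines.filter (fun ln => pvAnyIn (pvFilters.getD 5 []) (PySem.Str.lower ln))] := by
  induction lines with
  | nil => intro b0 b1 b2 b3 b4 b5; simp
  | cons ln rest ih =>
    intro b0 b1 b2 b3 b4 b5
    rw [List.foldl_cons, pvStep_explicit, ih,
      pvConsFilter b0 (fun ln => pvAnyIn (pvFilters.getD 0 []) (PySem.Str.lower ln)) ln rest,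
      pvConsFilter b1 (fun ln => pvAnyIn (pvFilters.getD 1 []) (PySem.Str.lower ln)) ln rest,
      pvConsFilter b2 (fun ln => pvAnyIn (pvFilters.getD 2 []) (PySem.Str.lower ln)) ln rest,
      pvConsFilter b3 (fun ln => pvAnyIn (pvFilters.getD 3 []) (PySem.Str.lower ln)) ln rest,
      pvConsFilter b4 (fun ln => pvAnyIn (pvFilters.getD 4 []) (PySem.Str.lower ln)) ln rest,
      pvConsFilter b5 (fun ln => pvAnyIn (pvFilters.getD 5 []) (PySem.Str.lower ln)) ln rest]

-- the selected bucket, as pvBody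
theorem pvBucket_body (c : String) (i : Nat) (hi : i < 6) :
    (if ((PySem.Str.splitlines c).foldl pvStep (pvFilters.map (fun _ => []))).getD i [] ≠ [] then
       PySem.Str.join "\n" (((PySem.Str.splitlines c).foldl pvStep (pvFilters.map (fun _ => []))).getD i [])
     else c)
    = pvBody c (fun ln => pvAnyIn (pvFilters.getD i []) (PySem.Str.lower ln)) := by
  have h : pvFilters.map (fun _ => ([] : List String)) = [[], [], [], [], [], []] := by
    simp [pvFilters]
  rw [h, pvBuckets_eq]
  interval_cases i <;> simp [pvBody]

-- ===== VERDICT (by name: the statement is the Claim_ definition above) =====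
theorem generate_rag_answer_spec : Claim_equal_generate_rag_answer := by
  intro question context _
  unfold Spec_generate_rag_answer generate_rag_answer generate_rag_answer_alt
  by_cases hc : PySem.Str.strip context = ""
  · simp only [if_pos hc]
  · simp only [if_neg hc]
    by_cases hq : PySem.Str.strip question = ""
    · simp only [if_pos hq]
    · simp only [if_neg hq]
      set ql := PySem.Str.lower (PySem.Str.strip question) with hql
      set c := PySem.Str.strip context with hcc
      have e0 : (fun ln => PySem.Str.isIn "security" (PySem.Str.lower ln) || PySem.Str.isIn "risk" (PySem.Str.lower ln))
          = (fun ln => pvAnyIn (pvFilters.getD 0 []) (PySem.Str.lower ln)) := by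
        funext ln; simp [pvFilters, pvAnyIn]
      have e4 : (fun ln => PySem.Str.isIn "performance" (PySem.Str.lower ln) || PySem.Str.isIn "optim" (PySem.Str.lower ln))
          = (fun ln => pvAnyIn (pvFilters.getD 4 []) (PySem.Str.lower ln)) := by
        funext ln; simp [pvFilters, pvAnyIn]
      have e5 : (fun ln => PySem.Str.isIn "quality" (PySem.Str.lower ln) || PySem.Str.isIn "score" (PySem.Str.lower ln))
          = (fun ln => pvAnyIn (pvFilters.getD 5 []) (PySem.Str.lower ln)) := by
        funext ln; simp [pvFilters, pvAnyIn]
      simp only [pvTriggers, List.map_cons, List.map_nil]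
      by_cases h1 : pvAnyIn ["security", "vulnerability", "risk", "safe", "credentials"] ql = true
      · rw [if_pos h1, h1]
        simp only [List.contains_cons, beq_self_eq_true, Bool.true_or, Bool.not_true,
          Bool.false_eq_true, reduceIte, List.idxOf_cons, beq_true, cond_true]
        rw [pvBucket_body c 0 (by norm_num), e0, pvSuffixes]
        simp only [List.getD_cons_zero]
      · rw [if_neg h1, (Bool.not_eq_true _).mp h1]
        by_cases h2 : pvAnyIn ["install", "run", "setup", "start", "deploy", "get started"] ql = true
        · rw [if_pos h2, h2]
          simp only [List.contains_cons, beq_self_eq_true, Bool.or_true,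
            Bool.true_or, Bool.not_true, Bool.false_eq_true, reduceIte, List.idxOf_cons,
            beq_true, zero_add, cond_true, cond_false]
          rw [pvBucket_body c 1 (by norm_num)]
          simp only [pvSuffixes, pvFilters, List.getD_cons_zero, List.getD_cons_succ,
            String.append_empty]
        · rw [if_neg h2, (Bool.not_eq_true _).mp h2]
          by_cases h3 : pvAnyIn ["architect", "structure", "design", "layer", "pattern"] ql = true
          · rw [if_pos h3, h3]
            simp only [List.contains_cons, beq_self_eq_true, Bool.or_true,
              Bool.true_or, Bool.not_true, Bool.false_eq_true, reduceIte, List.idxOf_cons,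
              beq_true, zero_add, cond_true, cond_false]
            rw [pvBucket_body c 2 (by norm_num)]
            simp only [pvSuffixes, pvFilters, List.getD_cons_zero, List.getD_cons_succ,
              String.append_empty]
          · rw [if_neg h3, (Bool.not_eq_true _).mp h3]
            by_cases h4 : pvAnyIn ["tech", "framework", "language", "stack", "built with", "technology"] ql = true
            · rw [if_pos h4, h4]
              simp only [List.contains_cons, beq_self_eq_true, Bool.or_true,
                Bool.true_or, Bool.not_true, Bool.false_eq_true, reduceIte, List.idxOf_cons,
                beq_true, zero_add, cond_true, cond_false]
              rw [pvBucket_body c 3 (by norm_num)]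
              simp only [pvSuffixes, pvFilters, List.getD_cons_zero, List.getD_cons_succ,
                String.append_empty]
            · rw [if_neg h4, (Bool.not_eq_true _).mp h4]
              by_cases h5 : pvAnyIn ["performance", "speed", "optim", "slow", "fast", "memory"] ql = true
              · rw [if_pos h5, h5]
                simp only [List.contains_cons, beq_self_eq_true, Bool.or_true,
                  Bool.true_or, Bool.not_true, Bool.false_eq_true, reduceIte, List.idxOf_cons,
                  beq_true, zero_add, cond_true, cond_false]
                rw [pvBucket_body c 4 (by norm_num), e4]
                simp only [pvSuffixes, List.getD_cons_zero, List.getD_cons_succ,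
                  String.append_empty]
              · rw [if_neg h5, (Bool.not_eq_true _).mp h5]
                by_cases h6 : pvAnyIn ["quality", "score", "rating", "grade"] ql = true
                · rw [if_pos h6, h6]
                  simp only [List.contains_cons, beq_self_eq_true, Bool.or_true,
                    Bool.true_or, Bool.not_true, Bool.false_eq_true, reduceIte, List.idxOf_cons,
                    beq_true, zero_add, cond_true, cond_false]
                  rw [pvBucket_body c 5 (by norm_num), e5]
                  simp only [pvSuffixes, List.getD_cons_zero, List.getD_cons_succ,
                    String.append_empty]
                · rw [if_neg h6, (Bool.not_eq_true _).mp h6]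
                  simp
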